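-- pv_equiv track=rewrite | github.com/Dev130/gfg_problems | potd_13July25.py | nonLisMaxSum
-- ===== SOURCE A (Python) =====
-- def nonLisMaxSum(arr):
--     n = len(arr)
--     if n == 0:
--         return 0
--
--     total_sum = sum(arr)
--
--     unique_vals = sorted(list(set(arr)))
--     val_to_coord = {val: i for i, val in enumerate(unique_vals)}
--     max_coord = len(unique_vals)
--
--     tree = [[0, 0] for _ in range(4 * max_coord)]
--
--     def combine(res1, res2):
--         if res1[0] > res2[0]:
--             return res1
--         elif res2[0] > res1[0]:
--             return res2
--         else:
--             if res1[0] == 0: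
--                 return [0,0]
--             return [res1[0], min(res1[1], res2[1])]
--
--     def update_tree(node, start, end, idx, value, current_sum):
--         if start == end:
--             if value > tree[node][0]:
--                 tree[node][0] = value
--                 tree[node][1] = current_sum
--             elif value == tree[node][0]:
--                 tree[node][1] = min(tree[node][1], current_sum)
--             return
--
--         mid = (start + end) // 2
--         if start <= idx <= mid:
--             update_tree(2 * node + 1, start, mid, idx, value, current_sum)
--         else:
--             update_tree(2 * node + 2, mid + 1, end, idx, value, current_sum)
--
--         tree[node] = combine(tree[2 * node + 1], tree[2 * node + 2])
--
--
--     def query_tree(node, start, end, l, r):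
--         if r < start or end < l:
--             return [0, 0]
--         if l <= start and end <= r:
--             return tree[node]
--
--         mid = (start + end) // 2
--         p1 = query_tree(2 * node + 1, start, mid, l, r)
--         p2 = query_tree(2 * node + 2, mid + 1, end, l, r)
--         return combine(p1, p2)
--
--     for x in arr:
--         compressed_x = val_to_coord[x]
--
--         if compressed_x > 0:
--             prev_lis_info = query_tree(0, 0, max_coord - 1, 0, compressed_x - 1)
--         else:
--             prev_lis_info = [0, 0]
--
--         current_lis_length = prev_lis_info[0] + 1
--         current_lis_sum = prev_lis_info[1] + x
--
--         update_tree(0, 0, max_coord - 1, compressed_x, current_lis_length, current_lis_sum)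
--
--     overall_max_lis_info = query_tree(0, 0, max_coord - 1, 0, max_coord - 1)
--     min_lis_sum = overall_max_lis_info[1]
--
--     return total_sum - min_lis_sum
-- ===== SOURCE B (Python) =====
-- def _better(b, p):
--     if b[0] > p[0]:
--         return b
--     if p[0] > b[0]:
--         return p
--     if b[0] == 0:
--         return (0, 0)
--     return (b[0], min(b[1], p[1]))
--
--
-- def nonLisMaxSum(arr):
--     if not arr:
--         return 0
--     vals = sorted(set(arr))
--     # best[c] = (length of longest increasing subsequence ending in vals[c] seen so far,
--     #            minimum sum among those of that length); (0, 0) if none yet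
--     best = [(0, 0)] * len(vals)
--     for x in arr:
--         c = vals.index(x)
--         p = (0, 0)
--         for q in best[:c]:
--             p = _better(p, q)
--         nl, ns = p[0] + 1, p[1] + x
--         cl, cs = best[c]
--         if nl > cl:
--             best[c] = (nl, ns)
--         elif nl == cl:
--             best[c] = (cl, min(cs, ns))
--     f = (0, 0)
--     for q in best:
--         f = _better(f, q)
--     return sum(arr) - f[1]
-- ===== Notes on version B (the rewrite author's own statement) =====
-- stated objective: simpler
-- what changed: Replaces A's recursive segment tree (coordinate compression, 4n node array, recursive update/query with combine) by a flat per-value table best[c] = (LIS length ending in value c, minimal sum), updated with the same tie rule and read by a linear scan over the prefix of smaller values.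
import Mathlib
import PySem

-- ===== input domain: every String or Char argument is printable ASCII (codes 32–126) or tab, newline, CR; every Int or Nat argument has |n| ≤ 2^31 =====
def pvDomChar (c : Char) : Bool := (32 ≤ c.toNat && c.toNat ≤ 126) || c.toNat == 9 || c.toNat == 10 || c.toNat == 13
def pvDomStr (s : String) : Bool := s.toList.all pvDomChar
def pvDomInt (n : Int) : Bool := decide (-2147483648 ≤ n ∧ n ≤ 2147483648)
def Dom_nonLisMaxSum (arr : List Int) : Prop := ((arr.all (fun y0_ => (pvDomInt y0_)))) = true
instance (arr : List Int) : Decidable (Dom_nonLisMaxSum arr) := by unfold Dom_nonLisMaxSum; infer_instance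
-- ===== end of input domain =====

-- B replaces A's recursive segment tree by a flat per-value best-table with linear prefix
-- scans: simpler, same exact result (return value only; neither mutates its argument).

-- ===== PORT A =====
-- combine(res1, res2)
def pyCombine (r1 r2 : Int × Int) : Int × Int :=
  if r1.1 > r2.1 then r1
  else if r2.1 > r1.1 then r2
  else if r1.1 = 0 then (0, 0)
  else (r1.1, min r1.2 r2.2)

-- Python's `tree` is a list of length 4*max_coord whose cells all start as [0, 0] and is
-- only ever indexed below 4*max_coord (the standard segment-tree node bound); it is
-- modelled exactly as a node ↦ cell map defaulting to (0, 0).  The `en ≤ start` guard is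
-- Python's `start == end` base case: every call has start ≤ end.
def updateTree (tree : PySem.Dict Nat (Int × Int)) (start en idx node : Nat)
    (value csum : Int) : PySem.Dict Nat (Int × Int) :=
  if en ≤ start then
    let cur := tree.getD node (0, 0)
    if value > cur.1 then tree.insert node (value, csum)
    else if value = cur.1 then tree.insert node (cur.1, min cur.2 csum)
    else tree
  else
    let mid := (start + en) / 2
    let tree' :=
      if start ≤ idx ∧ idx ≤ mid then updateTree tree start mid idx (2*node+1) value csum
      else updateTree tree (mid+1) en idx (2*node+2) value csum
    tree'.insert node (pyCombine (tree'.getD (2*node+1) (0, 0)) (tree'.getD (2*node+2) (0, 0)))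
termination_by en - start
decreasing_by all_goals omega

def queryTree (tree : PySem.Dict Nat (Int × Int)) (start en l r node : Nat) : Int × Int :=
  if r < start ∨ en < l then (0, 0)
  else if l ≤ start ∧ en ≤ r then tree.getD node (0, 0)
  else
    pyCombine (queryTree tree start ((start+en)/2) l r (2*node+1))
              (queryTree tree ((start+en)/2+1) en l r (2*node+2))
termination_by en - start
decreasing_by all_goals omega

def nonLisMaxSum (arr : List Int) : Int :=
  if arr.length = 0 then 0
  else
    let totalSum := arr.foldl (· + ·) 0
    let uniqueVals := PySem.List.sorted (PySem.Set.ofList arr) (fun x => x) false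
    let valToCoord : PySem.Dict Int Int :=
      (PySem.List.enumerate uniqueVals).foldl (fun d p => d.insert p.2 p.1) PySem.Dict.empty
    let maxCoord := uniqueVals.length
    let tree0 : PySem.Dict Nat (Int × Int) := PySem.Dict.empty
    let treeF := arr.foldl (fun tree x =>
      -- val_to_coord[x]: the key is always present and its value is ≥ 0
      let c := ((valToCoord.get? x).getD 0).toNat
      let prev := if 0 < c then queryTree tree 0 (maxCoord - 1) 0 (c - 1) 0 else (0, 0)
      updateTree tree 0 (maxCoord - 1) c 0 (prev.1 + 1) (prev.2 + x)) tree0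
    let overall := queryTree treeF 0 (maxCoord - 1) 0 (maxCoord - 1) 0
    totalSum - overall.2

-- ===== PORT B =====
-- _better(b, p)
def betterStep (b p : Int × Int) : Int × Int :=
  if b.1 > p.1 then b
  else if p.1 > b.1 then p
  else if b.1 = 0 then (0, 0)
  else (b.1, min b.2 p.2)

def nonLisMaxSum_alt (arr : List Int) : Int :=
  if arr.isEmpty then 0
  else
    let vals := PySem.List.sorted (PySem.Set.ofList arr) (fun x => x) false
    let best0 : List (Int × Int) := List.replicate vals.length (0, 0)
    let bestF := arr.foldl (fun best x =>
      let c := (PySem.List.index? vals x).getD 0   -- x is always in vals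
      let p := (best.take c).foldl betterStep (0, 0)   -- best[:c]
      let nl := p.1 + 1
      let ns := p.2 + x
      let cur := best.getD c (0, 0)
      if nl > cur.1 then best.set c (nl, ns)
      else if nl = cur.1 then best.set c (cur.1, min cur.2 ns)
      else best) best0
    let f := bestF.foldl betterStep (0, 0)
    arr.foldl (· + ·) 0 - f.2

-- ===== PRECONDITION & SPEC =====
def Spec_nonLisMaxSum (arr : List Int) (out : Int) : Prop := out = nonLisMaxSum_alt arr
instance (arr : List Int) (out : Int) : Decidable (Spec_nonLisMaxSum arr out) := by unfold Spec_nonLisMaxSum; infer_instance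

-- ===== CLAIM (what is proved, stated in full; the proofs are below) =====
def Claim_equal_nonLisMaxSum : Prop := ∀ (arr : List Int), Dom_nonLisMaxSum arr → Spec_nonLisMaxSum arr (nonLisMaxSum arr)

-- ===== LEMMAS AND PROOFS =====

-- well-formed cell: length component nonnegative, and the empty cell is exactly (0,0)
def pvWf (p : Int × Int) : Prop := 0 ≤ p.1 ∧ (p.1 = 0 → p.2 = 0)

-- fold of combine over best[lo..hi]
def ivFold (best : List (Int × Int)) (lo hi : Nat) : Int × Int :=
  ((best.drop lo).take (hi + 1 - lo)).foldl pyCombine (0, 0)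

-- the segment-tree representation invariant
inductive SegOk : PySem.Dict Nat (Int × Int) → List (Int × Int) → Nat → Nat → Nat → Prop
  | leaf {tree best node s} : tree.getD node (0, 0) = best.getD s (0, 0) → SegOk tree best node s s
  | node {tree best node s e} (hse : s < e)
      (hl : SegOk tree best (2*node+1) s ((s+e)/2))
      (hr : SegOk tree best (2*node+2) ((s+e)/2+1) e)
      (hv : tree.getD node (0, 0) =
        pyCombine (tree.getD (2*node+1) (0, 0)) (tree.getD (2*node+2) (0, 0))) :
      SegOk tree best node s e

-- m lies in the subtree rooted at n (heap indexing)
inductive Desc : Nat → Nat → Prop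
  | refl (n : Nat) : Desc n n
  | left {n m : Nat} : Desc n m → Desc n (2*m+1)
  | right {n m : Nat} : Desc n m → Desc n (2*m+2)

theorem desc_le {n m : Nat} (h : Desc n m) : n ≤ m := by
  induction h with
  | refl => exact le_rfl
  | left _ ih => omega
  | right _ ih => omega

theorem desc_bounds {n m : Nat} (h : Desc n m) :
    ∃ d : Nat, 2^d * (n+1) ≤ m+1 ∧ m+1 < 2^d * (n+2) := by
  induction h with
  | refl => exact ⟨0, by omega⟩
  | left _ ih =>
    obtain ⟨d, h1, h2⟩ := ih
    refine ⟨d+1, ?_, ?_⟩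
    · rw [show (2:ℕ)^(d+1) * (n+1) = 2 * (2^d * (n+1)) from by ring]; omega
    · rw [show (2:ℕ)^(d+1) * (n+2) = 2 * (2^d * (n+2)) from by ring]; omega
  | right _ ih =>
    obtain ⟨d, h1, h2⟩ := ih
    refine ⟨d+1, ?_, ?_⟩
    · rw [show (2:ℕ)^(d+1) * (n+1) = 2 * (2^d * (n+1)) from by ring]; omega
    · rw [show (2:ℕ)^(d+1) * (n+2) = 2 * (2^d * (n+2)) from by ring]; omega

theorem desc_disjoint {n m : Nat} (h1 : Desc (2*n+1) m) (h2 : Desc (2*n+2) m) : False := by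
  obtain ⟨d, hd1, hd2⟩ := desc_bounds h1
  obtain ⟨e, he1, he2⟩ := desc_bounds h2
  rcases le_or_gt d e with hde | hde
  · have hp : (2:ℕ)^d ≤ 2^e := Nat.pow_le_pow_right (by omega) hde
    have hkey : 2^d * (2*n+1+2) ≤ 2^e * (2*n+2+1) := by
      rw [show 2*n+1+2 = 2*n+2+1 from by ring]
      exact Nat.mul_le_mul_right _ hp
    omega
  · have hp : (2:ℕ)^(e+1) ≤ 2^d := Nat.pow_le_pow_right (by omega) (by omega)
    have hkey : 2^e * (2*n+2+2) ≤ 2^d * (2*n+1+1) := by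
      calc 2^e * (2*n+2+2) ≤ 2^e * (2*(2*n+1+1)) := Nat.mul_le_mul_left _ (by omega)
        _ = 2^(e+1) * (2*n+1+1) := by ring
        _ ≤ 2^d * (2*n+1+1) := Nat.mul_le_mul_right _ hp
    omega

theorem desc_child_left {n m : Nat} (h : Desc (2*n+1) m) : Desc n m := by
  induction h with
  | refl => exact Desc.left (Desc.refl n)
  | left _ ih => exact Desc.left ih
  | right _ ih => exact Desc.right ih

theorem desc_child_right {n m : Nat} (h : Desc (2*n+2) m) : Desc n m := by
  induction h with
  | refl => exact Desc.right (Desc.refl n)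
  | left _ ih => exact Desc.left ih
  | right _ ih => exact Desc.right ih

theorem comb_assoc (a b c : Int × Int) :
    pyCombine (pyCombine a b) c = pyCombine a (pyCombine b c) := by
  obtain ⟨a1, a2⟩ := a; obtain ⟨b1, b2⟩ := b; obtain ⟨c1, c2⟩ := c
  simp only [pyCombine, gt_iff_lt]
  split_ifs <;> dsimp only at * <;> simp only [Prod.mk.injEq] <;>
    first | rfl | omega | exact ⟨trivial, min_assoc _ _ _⟩

theorem wf_comb {a b : Int × Int} (ha : pvWf a) (hb : pvWf b) : pvWf (pyCombine a b) := by
  obtain ⟨a1, a2⟩ := a; obtain ⟨b1, b2⟩ := b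
  simp only [pyCombine, pvWf] at *
  split_ifs <;> simp_all

theorem comb_idl {a : Int × Int} (ha : pvWf a) : pyCombine (0, 0) a = a := by
  obtain ⟨a1, a2⟩ := a
  simp only [pyCombine, pvWf] at *
  split_ifs <;> simp_all <;> omega

theorem comb_idr {a : Int × Int} (ha : pvWf a) : pyCombine a (0, 0) = a := by
  obtain ⟨a1, a2⟩ := a
  simp only [pyCombine, pvWf] at *
  split_ifs <;> simp_all <;> omega

theorem wf_cfold {l : List (Int × Int)} {a : Int × Int} (ha : pvWf a)
    (hl : ∀ p ∈ l, pvWf p) : pvWf (l.foldl pyCombine a) := by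
  induction l generalizing a with
  | nil => exact ha
  | cons x t ih =>
    exact ih (wf_comb ha (hl x (by simp))) (fun p hp => hl p (by simp [hp]))

theorem cfold_from {l : List (Int × Int)} {a : Int × Int} (ha : pvWf a)
    (hl : ∀ p ∈ l, pvWf p) :
    l.foldl pyCombine a = pyCombine a (l.foldl pyCombine (0, 0)) := by
  induction l generalizing a with
  | nil => simp [comb_idr ha]
  | cons x t ih =>
    have hx : pvWf x := hl x (by simp)
    have ht : ∀ p ∈ t, pvWf p := fun p hp => hl p (by simp [hp])
    simp only [List.foldl_cons]
    rw [ih (wf_comb ha hx) ht, ih (wf_comb (by exact ⟨le_rfl, fun _ => rfl⟩) hx) ht,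
        comb_idl hx, comb_assoc]

theorem cfold_append {xs ys : List (Int × Int)} (hxs : ∀ p ∈ xs, pvWf p)
    (hys : ∀ p ∈ ys, pvWf p) :
    (xs ++ ys).foldl pyCombine (0, 0) =
      pyCombine (xs.foldl pyCombine (0, 0)) (ys.foldl pyCombine (0, 0)) := by
  rw [List.foldl_append]
  exact cfold_from (wf_cfold ⟨le_rfl, fun _ => rfl⟩ hxs) hys

theorem wf_ivFold {best : List (Int × Int)} (hb : ∀ p ∈ best, pvWf p) (lo hi : Nat) :
    pvWf (ivFold best lo hi) := by
  refine wf_cfold ⟨le_rfl, fun _ => rfl⟩ (fun p hp => hb p ?_)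
  exact List.mem_of_mem_drop (List.mem_of_mem_take hp)

theorem ivFold_split {best : List (Int × Int)} (hb : ∀ p ∈ best, pvWf p)
    {lo mid hi : Nat} (h1 : lo ≤ mid + 1) (h2 : mid ≤ hi) :
    ivFold best lo hi = pyCombine (ivFold best lo mid) (ivFold best (mid+1) hi) := by
  have key : (best.drop lo).take (hi + 1 - lo) =
      (best.drop lo).take (mid + 1 - lo) ++ (best.drop (mid+1)).take (hi + 1 - (mid+1)) := by
    rw [show hi + 1 - lo = (mid + 1 - lo) + (hi + 1 - (mid+1)) from by omega, List.take_add,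
        List.drop_drop, show lo + (mid + 1 - lo) = mid + 1 from by omega]
  unfold ivFold
  rw [key, cfold_append]
  · intro p hp; exact hb p (List.mem_of_mem_drop (List.mem_of_mem_take hp))
  · intro p hp; exact hb p (List.mem_of_mem_drop (List.mem_of_mem_take hp))

theorem ivFold_empty {best : List (Int × Int)} {lo hi : Nat} (h : hi + 1 ≤ lo) :
    ivFold best lo hi = (0, 0) := by
  unfold ivFold
  rw [show hi + 1 - lo = 0 by omega]
  simp

theorem ivFold_single {best : List (Int × Int)} (hb : ∀ p ∈ best, pvWf p) (s : Nat) :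
    ivFold best s s = best.getD s (0, 0) := by
  unfold ivFold
  rcases lt_or_ge s best.length with hs | hs
  · have : (best.drop s).take (s + 1 - s) = [best[s]] := by
      rw [show s + 1 - s = 1 by omega]
      rw [List.take_one, List.head?_drop]
      simp [List.getElem?_eq_getElem hs]
    rw [this]
    simp only [List.foldl_cons, List.foldl_nil]
    rw [comb_idl (hb _ (List.getElem_mem hs))]
    simp [List.getD, List.getElem?_eq_getElem hs]
  · rw [List.drop_eq_nil_of_le hs]
    simp [List.getD, List.getElem?_eq_none_iff.mpr hs]

-- node value = fold of its whole range
theorem segOk_value {tree best node s e} (h : SegOk tree best node s e)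
    (hb : ∀ p ∈ best, pvWf p) : tree.getD node (0, 0) = ivFold best s e := by
  induction h with
  | leaf hv => rw [hv, ivFold_single hb]
  | node hse hl hr hv ihl ihr =>
    rw [hv, ihl, ihr, ← ivFold_split hb (by omega) (by omega)]

theorem segOk_query {tree best node s e} (h : SegOk tree best node s e)
    (hb : ∀ p ∈ best, pvWf p) (l r : Nat) :
    queryTree tree s e l r node = ivFold best (max s l) (min e r) := by
  induction h with
  | @leaf node s hv =>
    rw [queryTree]
    split_ifs with h1 h2
    · exact (ivFold_empty (by omega)).symm
    · rw [hv, show max s l = s by omega, show min s r = s by omega, ivFold_single hb]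
    · omega
  | @node node s e hse hl hr hv ihl ihr =>
    rw [queryTree]
    split_ifs with h1 h2
    · exact (ivFold_empty (by omega)).symm
    · rw [show max s l = s by omega, show min e r = e by omega,
          ← segOk_value (SegOk.node hse hl hr hv) hb, hv,
          segOk_value hl hb, segOk_value hr hb,
          ← ivFold_split hb (by omega) (by omega)]
    · rw [ihl, ihr]
      have hsr : s ≤ r := by omega
      have hle : l ≤ e := by omega
      rcases le_or_gt r ((s+e)/2) with hrm | hrm
      · rw [ivFold_empty (lo := max ((s+e)/2+1) l) (hi := min e r) (by omega),
            comb_idr (wf_ivFold hb _ _), show min ((s+e)/2) r = min e r by omega]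
      · rcases le_or_gt l ((s+e)/2) with hlm | hlm
        · rw [show min ((s+e)/2) r = (s+e)/2 by omega,
              show max ((s+e)/2+1) l = (s+e)/2+1 by omega,
              ← ivFold_split hb (by omega) (by omega)]
        · rw [ivFold_empty (lo := max s l) (hi := min ((s+e)/2) r) (by omega),
              comb_idl (wf_ivFold hb _ _), show max ((s+e)/2+1) l = max s l by omega]

-- updateTree touches only the subtree of `node`
theorem upd_outside (tree : PySem.Dict Nat (Int × Int)) (s e i node : Nat) (v c : Int)
    (m : Nat) (hm : ¬ Desc node m) :
    (updateTree tree s e i node v c).getD m (0, 0) = tree.getD m (0, 0) := by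
  have hne : m ≠ node := fun h => hm (h ▸ Desc.refl node)
  rw [updateTree]
  split_ifs with h1
  · simp only []
    split_ifs <;> first | rw [PySem.Dict.getD_insert_of_ne _ _ _ hne] | rfl
  · have hml : ¬ Desc (2*node+1) m := fun h => hm (desc_child_left h)
    have hmr : ¬ Desc (2*node+2) m := fun h => hm (desc_child_right h)
    simp only []
    split_ifs with h2
    · rw [PySem.Dict.getD_insert_of_ne _ _ _ hne, upd_outside _ _ _ _ _ _ _ _ hml]
    · rw [PySem.Dict.getD_insert_of_ne _ _ _ hne, upd_outside _ _ _ _ _ _ _ _ hmr]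
termination_by e - s
decreasing_by all_goals omega

-- congruence of SegOk in the tree (on the subtree) and in the table (on the range)
theorem segOk_congr {tree tree' : PySem.Dict Nat (Int × Int)} {best best' : List (Int × Int)}
    {node s e : Nat} (h : SegOk tree best node s e)
    (ht : ∀ m, Desc node m → tree'.getD m (0, 0) = tree.getD m (0, 0))
    (hbe : ∀ j, s ≤ j → j ≤ e → best'.getD j (0, 0) = best.getD j (0, 0)) :
    SegOk tree' best' node s e := by
  induction h with
  | @leaf node s hv =>
    exact SegOk.leaf (by rw [ht node (Desc.refl node), hv, hbe s le_rfl le_rfl])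
  | @node node s e hse hl hr hv ihl ihr =>
    refine SegOk.node hse
      (ihl (fun m hm => ht m (desc_child_left hm)) (fun j h1 h2 => hbe j h1 (by omega)))
      (ihr (fun m hm => ht m (desc_child_right hm)) (fun j h1 h2 => hbe j (by omega) h2)) ?_
    rw [ht node (Desc.refl node), ht _ (Desc.left (Desc.refl node)),
        ht _ (Desc.right (Desc.refl node)), hv]

-- the leaf update rule, as B performs it on the table
def leafUpd (best : List (Int × Int)) (c : Nat) (v s : Int) : List (Int × Int) :=
  if v > (best.getD c (0, 0)).1 then best.set c (v, s)
  else if v = (best.getD c (0, 0)).1 then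
    best.set c ((best.getD c (0, 0)).1, min (best.getD c (0, 0)).2 s)
  else best

theorem getD_set_self {l : List (Int × Int)} {i : Nat} (h : i < l.length) (x : Int × Int) :
    (l.set i x).getD i (0, 0) = x := by
  simp [List.getD, List.getElem?_set_self', List.getElem?_eq_getElem h]

theorem getD_set_ne {l : List (Int × Int)} {i j : Nat} (h : i ≠ j) (x : Int × Int) :
    (l.set i x).getD j (0, 0) = l.getD j (0, 0) := by
  simp [List.getD, List.getElem?_set_ne h]

theorem leafUpd_getD_ne {best : List (Int × Int)} {c j : Nat} (h : c ≠ j) (v s : Int) :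
    (leafUpd best c v s).getD j (0, 0) = best.getD j (0, 0) := by
  unfold leafUpd
  split_ifs <;> first | rw [getD_set_ne h] | rfl

theorem segOk_update {tree best node s e} (h : SegOk tree best node s e)
    {i : Nat} (hi1 : s ≤ i) (hi2 : i ≤ e) (hlen : i < best.length) (v c : Int) :
    SegOk (updateTree tree s e i node v c) (leafUpd best i v c) node s e := by
  induction h with
  | @leaf node s hv =>
    have hsi : s = i := by omega
    subst hsi
    refine SegOk.leaf ?_
    rw [updateTree]
    simp only [le_refl, if_true]
    unfold leafUpd
    rw [← hv]
    split_ifs with h1 h2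
    · rw [PySem.Dict.getD_insert_self]
      exact (getD_set_self hlen _).symm
    · rw [PySem.Dict.getD_insert_self]
      exact (getD_set_self hlen _).symm
    · exact hv
  | @node node s e hse hl hr hv ihl ihr =>
    have hmid := Nat.div_le_self (s+e) 2
    rw [updateTree]
    rw [if_neg (by omega)]
    simp only []
    by_cases hc : s ≤ i ∧ i ≤ (s+e)/2
    · rw [if_pos hc]
      set tl := updateTree tree s ((s+e)/2) i (2*node+1) v c with htl
      have hL : SegOk tl (leafUpd best i v c) (2*node+1) s ((s+e)/2) := ihl hc.1 hc.2
      refine SegOk.node hse ?_ ?_ ?_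
      · refine segOk_congr hL (fun m hm => ?_) (fun j _ _ => rfl)
        exact PySem.Dict.getD_insert_of_ne _ _ _ (by have := desc_le hm; omega)
      · refine segOk_congr hr (fun m hm => ?_) (fun j h1 h2 => leafUpd_getD_ne (by omega) v c)
        have hm1 : ¬ Desc (2*node+1) m := fun hd => desc_disjoint hd hm
        rw [PySem.Dict.getD_insert_of_ne _ _ _ (by have := desc_le hm; omega), htl]
        exact upd_outside _ _ _ _ _ _ _ _ hm1
      · rw [PySem.Dict.getD_insert_self,
            PySem.Dict.getD_insert_of_ne _ _ _ (by omega),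
            PySem.Dict.getD_insert_of_ne _ _ _ (by omega)]
    · rw [if_neg hc]
      set tr := updateTree tree ((s+e)/2+1) e i (2*node+2) v c with htr
      have hR : SegOk tr (leafUpd best i v c) (2*node+2) ((s+e)/2+1) e := ihr (by omega) hi2
      refine SegOk.node hse ?_ ?_ ?_
      · refine segOk_congr hl (fun m hm => ?_) (fun j h1 h2 => leafUpd_getD_ne (by omega) v c)
        have hm2 : ¬ Desc (2*node+2) m := fun hd => desc_disjoint hm hd
        rw [PySem.Dict.getD_insert_of_ne _ _ _ (by have := desc_le hm; omega), htr]
        exact upd_outside _ _ _ _ _ _ _ _ hm2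
      · refine segOk_congr hR (fun m hm => ?_) (fun j _ _ => rfl)
        exact PySem.Dict.getD_insert_of_ne _ _ _ (by have := desc_le hm; omega)
      · rw [PySem.Dict.getD_insert_self,
            PySem.Dict.getD_insert_of_ne _ _ _ (by omega),
            PySem.Dict.getD_insert_of_ne _ _ _ (by omega)]

theorem getD_replicate (u j : Nat) : (List.replicate u ((0:Int), (0:Int))).getD j (0, 0) = (0, 0) := by
  rcases lt_or_ge j u with h | h
  · have h' : j < (List.replicate u ((0:Int), (0:Int))).length := by simpa using h
    simp [List.getD, List.getElem?_eq_getElem h', List.getElem_replicate]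
  · have h' : (List.replicate u ((0:Int), (0:Int))).length ≤ j := by simpa using h
    simp [List.getD, List.getElem?_eq_none_iff.mpr h']

theorem segOk_zero (u node s e : Nat) (h : s ≤ e) :
    SegOk PySem.Dict.empty (List.replicate u ((0:Int), (0:Int))) node s e := by
  rcases eq_or_lt_of_le h with hse | hse
  · exact hse ▸ SegOk.leaf (by rw [getD_replicate, PySem.Dict.getD_empty])
  · exact SegOk.node hse (segOk_zero u (2*node+1) s ((s+e)/2) (by omega))
      (segOk_zero u (2*node+2) ((s+e)/2+1) e (by omega))
      (by rw [PySem.Dict.getD_empty, PySem.Dict.getD_empty, PySem.Dict.getD_empty]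
          simp [pyCombine])
termination_by e - s
decreasing_by all_goals omega

-- dictionary built from enumerate = index lookup (distinct keys)
theorem get?_foldl_insert_not_mem {l : List (Int × Int)} {d : PySem.Dict Int Int} {x : Int}
    (hx : ∀ p ∈ l, p.2 ≠ x) :
    (l.foldl (fun d p => d.insert p.2 p.1) d).get? x = d.get? x := by
  induction l generalizing d with
  | nil => rfl
  | cons p t ih =>
    simp only [List.foldl_cons]
    rw [ih (fun q hq => hx q (by simp [hq]))]
    exact PySem.Dict.get?_insert_of_ne _ _ (Ne.symm (hx p (by simp)))

theorem dict_enum_get? (vals : List Int) (st : Int) (d : PySem.Dict Int Int) (x : Int)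
    (hx : x ∈ vals) (hnd : vals.Nodup) :
    ((PySem.List.enumerate vals st).foldl (fun d p => d.insert p.2 p.1) d).get? x =
      some (st + ((PySem.List.index? vals x).getD 0 : Nat)) := by
  induction vals generalizing st d with
  | nil => cases hx
  | cons v t ih =>
    rw [PySem.List.enumerate_cons]
    simp only [List.foldl_cons]
    by_cases hvx : v = x
    · subst hvx
      have hvt : v ∉ t := (List.nodup_cons.mp hnd).1
      have hne : ∀ p ∈ PySem.List.enumerate t (st+1), p.2 ≠ v := by
        intro p hp
        rcases (PySem.List.mem_enumerate_iff _ _ _).mp hp with ⟨k, hk, rfl⟩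
        intro h
        exact hvt (h ▸ List.getElem_mem hk)
      rw [get?_foldl_insert_not_mem hne, PySem.Dict.get?_insert_self,
          PySem.List.index?_cons_self]
      simp
    · have hxt : x ∈ t := by
        rcases List.mem_cons.mp hx with h | h
        · exact absurd h.symm hvx
        · exact h
      rw [ih _ _ hxt (List.nodup_cons.mp hnd).2, PySem.List.index?_cons_of_ne _ hvx]
      obtain ⟨k, hk⟩ := Option.isSome_iff_exists.mp ((PySem.List.index?_isSome_iff t x).mpr hxt)
      rw [hk]
      simp only [Option.map_some, Option.getD_some, Option.some.injEq]
      push_cast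
      omega

theorem index?_lt_length {vals : List Int} {x : Int} (hx : x ∈ vals) :
    ((PySem.List.index? vals x).getD 0) < vals.length := by
  obtain ⟨k, hk⟩ := (PySem.List.index?_isSome_iff vals x).mpr hx |> Option.isSome_iff_exists.mp
  obtain ⟨hlt, -, -⟩ := PySem.List.getElem_of_index?_eq_some hk
  rw [hk]
  exact hlt

-- the per-element loop steps of the two ports
def stepA (vals : List Int) (q : PySem.Dict Int Int) (tree : PySem.Dict Nat (Int × Int))
    (x : Int) : PySem.Dict Nat (Int × Int) :=
  let c := ((q.get? x).getD 0).toNat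
  let prev := if 0 < c then queryTree tree 0 (vals.length - 1) 0 (c - 1) 0 else (0, 0)
  updateTree tree 0 (vals.length - 1) c 0 (prev.1 + 1) (prev.2 + x)

def stepB (vals : List Int) (best : List (Int × Int)) (x : Int) : List (Int × Int) :=
  let c := (PySem.List.index? vals x).getD 0
  let p := (best.take c).foldl betterStep (0, 0)
  let nl := p.1 + 1
  let ns := p.2 + x
  let cur := best.getD c (0, 0)
  if nl > cur.1 then best.set c (nl, ns)
  else if nl = cur.1 then best.set c (cur.1, min cur.2 ns)
  else best

theorem better_eq_comb : betterStep = pyCombine := rfl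

theorem ivFold_prefix {best : List (Int × Int)} {c : Nat} (hcpos : 0 < c) :
    ivFold best 0 (c - 1) = (best.take c).foldl pyCombine (0, 0) := by
  unfold ivFold
  rw [List.drop_zero, show c - 1 + 1 - 0 = c by omega]

-- one loop step preserves the invariant and keeps the two sides in lockstep
theorem step_invariant {vals : List Int} {q : PySem.Dict Int Int}
    (hq : ∀ y ∈ vals, q.get? y = some (((PySem.List.index? vals y).getD 0 : Nat) : Int))
    {tree best} (hs : SegOk tree best 0 0 (vals.length - 1))
    (hwf : ∀ p ∈ best, pvWf p) (hlen : best.length = vals.length)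
    {x : Int} (hx : x ∈ vals) :
    SegOk (stepA vals q tree x) (stepB vals best x) 0 0 (vals.length - 1) ∧
      (∀ p ∈ stepB vals best x, pvWf p) ∧ (stepB vals best x).length = vals.length := by
  have hclt : ((PySem.List.index? vals x).getD 0) < vals.length := index?_lt_length hx
  set c : Nat := (PySem.List.index? vals x).getD 0 with hc
  have hcA : ((q.get? x).getD 0).toNat = c := by
    rw [hq x hx]
    simp only [Option.getD_some, Int.toNat_natCast]
    exact hc.symm
  have hprev : (if 0 < c then queryTree tree 0 (vals.length - 1) 0 (c - 1) 0 else (0, 0)) =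
      (best.take c).foldl betterStep (0, 0) := by
    rw [better_eq_comb]
    split_ifs with h
    · rw [segOk_query hs hwf 0 (c-1), Nat.max_self, show min (vals.length - 1) (c-1) = c - 1 by omega,
          ivFold_prefix h]
    · rw [show c = 0 by omega]
      simp
  have hwfprev : pvWf ((best.take c).foldl betterStep (0, 0)) := by
    rw [better_eq_comb]
    exact wf_cfold ⟨le_rfl, fun _ => rfl⟩ (fun p hp => hwf p (List.mem_of_mem_take hp))
  have hBeq : stepB vals best x = leafUpd best c
      (((best.take c).foldl betterStep (0, 0)).1 + 1)
      (((best.take c).foldl betterStep (0, 0)).2 + x) := by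
    simp only [stepB, leafUpd, ← hc]
  refine ⟨?_, ?_, ?_⟩
  · have hA : stepA vals q tree x =
        updateTree tree 0 (vals.length - 1) (((q.get? x).getD 0).toNat) 0
          ((if 0 < ((q.get? x).getD 0).toNat then
              queryTree tree 0 (vals.length - 1) 0 (((q.get? x).getD 0).toNat - 1) 0
            else (0, 0)).1 + 1)
          ((if 0 < ((q.get? x).getD 0).toNat then
              queryTree tree 0 (vals.length - 1) 0 (((q.get? x).getD 0).toNat - 1) 0
            else (0, 0)).2 + x) := rfl
    rw [hBeq, hA, hcA, hprev]
    exact segOk_update hs (Nat.zero_le c) (by omega) (by omega) _ _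
  · rw [hBeq]
    intro p hp
    unfold leafUpd at hp
    have hwfnew : pvWf (((best.take c).foldl betterStep (0, 0)).1 + 1,
        ((best.take c).foldl betterStep (0, 0)).2 + x) := by
      constructor
      · have := hwfprev.1; simp only []; omega
      · have := hwfprev.1; intro h; simp only [] at h; omega
    split_ifs at hp with h1 h2
    · rcases List.mem_or_eq_of_mem_set hp with h | rfl
      · exact hwf p h
      · exact hwfnew
    · rcases List.mem_or_eq_of_mem_set hp with h | rfl
      · exact hwf p h
      · refine ⟨?_, fun h0 => ?_⟩ <;>
          · have h3 := hwfprev.1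
            simp only [] at h2 ⊢
            omega
    · exact hwf p hp
  · rw [hBeq]
    unfold leafUpd
    split_ifs <;> simp [hlen]

theorem loop_invariant (vals : List Int) (q : PySem.Dict Int Int)
    (hq : ∀ y ∈ vals, q.get? y = some (((PySem.List.index? vals y).getD 0 : Nat) : Int))
    (xs : List Int) (hxs : ∀ x ∈ xs, x ∈ vals)
    {tree best} (hs : SegOk tree best 0 0 (vals.length - 1))
    (hwf : ∀ p ∈ best, pvWf p) (hlen : best.length = vals.length) :
    SegOk (xs.foldl (stepA vals q) tree) (xs.foldl (stepB vals) best) 0 0 (vals.length - 1) ∧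
      (∀ p ∈ xs.foldl (stepB vals) best, pvWf p) ∧
      (xs.foldl (stepB vals) best).length = vals.length := by
  induction xs generalizing tree best with
  | nil => exact ⟨hs, hwf, hlen⟩
  | cons x t ih =>
    obtain ⟨h1, h2, h3⟩ := step_invariant hq hs hwf hlen (hxs x (by simp))
    exact ih (fun y hy => hxs y (by simp [hy])) h1 h2 h3

-- ===== VERDICT (by name: the statement is the Claim_ definition above) =====
theorem nonLisMaxSum_spec : Claim_equal_nonLisMaxSum := by
  intro arr _
  unfold Spec_nonLisMaxSum nonLisMaxSum nonLisMaxSum_alt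
  rcases eq_or_ne arr [] with rfl | hne
  · simp
  · rw [if_neg (by simpa using hne), if_neg (by simpa [List.isEmpty_iff] using hne)]
    set vals := PySem.List.sorted (PySem.Set.ofList arr) (fun x => x) false with hvals
    set dq : PySem.Dict Int Int :=
      (PySem.List.enumerate vals).foldl (fun d p => d.insert p.2 p.1) PySem.Dict.empty with hdq
    show arr.foldl (· + ·) 0 -
        (queryTree (arr.foldl (stepA vals dq) PySem.Dict.empty) 0 (vals.length - 1) 0
          (vals.length - 1) 0).2 =
      arr.foldl (· + ·) 0 -
        ((arr.foldl (stepB vals) (List.replicate vals.length (0, 0))).foldl betterStep (0, 0)).2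
    have hnd : vals.Nodup :=
      ((PySem.List.sorted_perm (PySem.Set.ofList arr) (fun x => x) false).nodup_iff).mpr
        (PySem.Set.nodup_ofList arr)
    have hmem : ∀ x ∈ arr, x ∈ vals := by
      intro x hx
      rw [hvals, PySem.List.mem_sorted]
      exact (PySem.Set.mem_ofList _ _).mpr hx
    have hvne : vals ≠ [] := by
      obtain ⟨x, hx⟩ := List.exists_mem_of_ne_nil arr hne
      exact List.ne_nil_of_mem (hmem x hx)
    have hu : 0 < vals.length := List.length_pos_of_ne_nil hvne
    have hq : ∀ y ∈ vals, dq.get? y = some (((PySem.List.index? vals y).getD 0 : Nat) : Int) := by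
      intro y hy
      rw [hdq, dict_enum_get? vals 0 PySem.Dict.empty y hy hnd]
      simp
    obtain ⟨hS, hW, hL⟩ := loop_invariant vals dq hq arr hmem
      (tree := PySem.Dict.empty) (best := List.replicate vals.length (0, 0))
      (segOk_zero vals.length 0 0 (vals.length - 1) (Nat.zero_le _))
      (fun p hp => by
        rw [List.eq_of_mem_replicate hp]
        exact ⟨le_rfl, fun _ => rfl⟩)
      (List.length_replicate)
    have hfinal : queryTree (arr.foldl (stepA vals dq) PySem.Dict.empty) 0 (vals.length - 1) 0
        (vals.length - 1) 0 =
        (arr.foldl (stepB vals) (List.replicate vals.length (0, 0))).foldl betterStep (0, 0) := by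
      rw [better_eq_comb, segOk_query hS hW, Nat.max_self, Nat.min_self,
          ivFold_prefix (c := vals.length) hu]
      congr 1
      exact List.take_of_length_le (le_of_eq hL)
    rw [hfinal]
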